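-- pv_equiv track=rewrite | github.com/Sahil2004/NN-Hyperparameter-tuning | crew_ai_agents.py | extract_section_by_header
-- ===== SOURCE A (Python) =====
-- def extract_section_by_header(text: str, header: str) -> str:
--     """Extract section content by header"""
--     if not isinstance(text, str):
--         text = str(text)
--
--     header_index = text.find(header)
--     if header_index == -1:
--         return ""
--
--     # Find the start of content after header
--     content_start = header_index + len(header)
--
--     # Find the next header or end of text
--     next_headers = [
--         "ARCHITECTURE DESIGN:",
--         "HYPERPARAMETERS:",
--         "TRAINING SCRIPT:",
--         "DATA ANALYSIS:"
--     ]
--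
--     next_header_pos = len(text)
--     for h in next_headers:
--         if h != header:
--             pos = text.find(h, content_start)
--             if pos != -1 and pos < next_header_pos:
--                 next_header_pos = pos
--
--     section_content = text[content_start:next_header_pos].strip()
--     return section_content
-- ===== SOURCE B (Python) =====
-- _KNOWN_HEADERS = [
--     "ARCHITECTURE DESIGN:",
--     "HYPERPARAMETERS:",
--     "TRAINING SCRIPT:",
--     "DATA ANALYSIS:",
-- ]
--
--
-- def extract_section_by_header(text: str, header: str) -> str:
--     """Extract section content by header: single left-to-right position scan.
--
--     Instead of running one find() per known header and taking the minimum,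
--     walk the positions after the requested header once and stop at the first
--     position where any OTHER known header begins."""
--     if not isinstance(text, str):
--         text = str(text)
--     idx = text.find(header)
--     if idx == -1:
--         return ""
--     start = idx + len(header)
--     end = len(text)
--     for i in range(start, len(text)):
--         if any(h != header and text.startswith(h, i) for h in _KNOWN_HEADERS):
--             end = i
--             break
--     return text[start:end].strip()
-- ===== Notes on version B (the rewrite author's own statement) =====
-- stated objective: alternative
-- what changed: B replaces A's per-header find()+running-minimum pass over the four known headers by a single left-to-right scan of the positions after the requested header, stopping at the first position where any other known header begins.
import Mathlib
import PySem

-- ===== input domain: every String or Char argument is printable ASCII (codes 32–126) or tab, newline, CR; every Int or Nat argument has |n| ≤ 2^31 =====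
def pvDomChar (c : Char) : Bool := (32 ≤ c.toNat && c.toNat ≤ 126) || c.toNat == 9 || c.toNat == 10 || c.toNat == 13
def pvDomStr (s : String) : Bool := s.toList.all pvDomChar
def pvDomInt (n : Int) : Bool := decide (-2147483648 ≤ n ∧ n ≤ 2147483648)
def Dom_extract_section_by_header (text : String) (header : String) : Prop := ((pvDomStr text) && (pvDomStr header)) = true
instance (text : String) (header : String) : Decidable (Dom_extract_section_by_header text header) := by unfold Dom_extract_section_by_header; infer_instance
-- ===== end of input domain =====

-- B replaces A's per-header find()+running-minimum pass by a single left-to-right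
-- position scan stopping at the first position where any other known header begins
-- (objective: alternative decomposition, same exact behaviour).

-- ===== PORT A =====
-- the known-headers list of A (module constant inside the function body)
def pvNextHeaders : List String :=
  ["ARCHITECTURE DESIGN:", "HYPERPARAMETERS:", "TRAINING SCRIPT:", "DATA ANALYSIS:"]

def extract_section_by_header (text : String) (header : String) : String :=
  -- 'if not isinstance(text, str)' is unreachable under the String typing
  let header_index := PySem.Str.find text header
  if header_index = -1 then ""
  else
    let content_start := header_index + PySem.Str.len header
    let next_header_pos := pvNextHeaders.foldl (fun acc h =>
      if h ≠ header then
        let pos := PySem.Str.findFrom text h content_start none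
        if pos ≠ -1 ∧ pos < acc then pos else acc
      else acc) (PySem.Str.len text)
    PySem.Str.strip (PySem.Str.slice text (some content_start) (some next_header_pos))

-- ===== PORT B =====
-- B's module constant _KNOWN_HEADERS
def pvKnownHeaders : List String :=
  ["ARCHITECTURE DESIGN:", "HYPERPARAMETERS:", "TRAINING SCRIPT:", "DATA ANALYSIS:"]

def extract_section_by_header_alt (text : String) (header : String) : String :=
  let idx := PySem.Str.find text header
  if idx = -1 then ""
  else
    let start := idx + PySem.Str.len header
    -- 'for i in range(start, len(text)): if any(...): end = i; break' ported as
    -- find? over the range with default len(text);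
    -- text.startswith(h, i) with 0 ≤ i is exactly startswith of text.toList.drop i
    let endPos := ((PySem.List.pyRange start (PySem.Str.len text)).find? (fun i =>
        pvKnownHeaders.any (fun h =>
          decide (h ≠ header) && PySem.Chars.startswith (text.toList.drop i.toNat) h.toList))).getD
      (PySem.Str.len text)
    PySem.Str.strip (PySem.Str.slice text (some start) (some endPos))

-- ===== PRECONDITION & SPEC =====
def Spec_extract_section_by_header (text : String) (header : String) (out : String) : Prop := out = extract_section_by_header_alt text header
instance (text : String) (header : String) (out : String) : Decidable (Spec_extract_section_by_header text header out) := by unfold Spec_extract_section_by_header; infer_instance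

-- ===== CLAIM (what is proved, stated in full; the proofs are below) =====
def Claim_equal_extract_section_by_header : Prop := ∀ (text : String) (header : String), Dom_extract_section_by_header text header → Spec_extract_section_by_header text header (extract_section_by_header text header)

-- ===== LEMMAS AND PROOFS =====

-- Q s header i : some known header other than `header` starts at position i of s
def pvHit (s : List Char) (header : String) (i : Nat) : Prop :=
  ∃ h ∈ pvNextHeaders, h ≠ header ∧ h.toList <+: s.drop i

-- first satisfying element of a strictly sorted list
theorem pv_find?_eq_some {l : List Int} (hl : l.Pairwise (· < ·)) (p : Int → Bool) (x : Int)
    (hx : x ∈ l) (hpx : p x = true) (hmin : ∀ y ∈ l, y < x → p y = false) :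
    l.find? p = some x := by
  induction l with
  | nil => cases hx
  | cons a t ih =>
    rcases List.mem_cons.mp hx with rfl | hxt
    · simp [List.find?, hpx]
    · have hax : a < x := (List.pairwise_cons.mp hl).1 x hxt
      have hpa : p a = false := hmin a List.mem_cons_self hax
      simp only [List.find?, hpa]
      exact ih (List.pairwise_cons.mp hl).2 hxt (fun y hy => hmin y (List.mem_cons_of_mem _ hy))

-- drop i of s is a drop of (drop start) when start ≤ i
theorem pv_drop_drop {α : Type} {s : List α} {start i : Nat} (h : start ≤ i) :
    s.drop i = (s.drop start).drop (i - start) := by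
  rw [List.drop_drop]; congr 1; omega

-- invariant of A's running-minimum fold over a sublist of the known headers
theorem pvFoldA_spec (s : List Char) (header : String) (start : Nat)
    (hstart : start ≤ s.length) :
    ∀ (L : List String), (∀ h ∈ L, h ∈ pvNextHeaders) →
    ∀ (acc : Int), (start : Int) ≤ acc → acc ≤ (s.length : Int) →
      (acc = (s.length : Int) ∨ pvHit s header acc.toNat) →
      let e := L.foldl (fun acc h =>
        if h ≠ header then
          if PySem.Chars.findFrom s h.toList (start : Int) none ≠ -1 ∧
              PySem.Chars.findFrom s h.toList (start : Int) none < acc then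
            PySem.Chars.findFrom s h.toList (start : Int) none
          else acc
        else acc) acc
      (start : Int) ≤ e ∧ e ≤ acc ∧
        (e = (s.length : Int) ∨ pvHit s header e.toNat) ∧
        (∀ h ∈ L, h ≠ header → ∀ i : Nat, start ≤ i → (i : Int) < e → ¬ h.toList <+: s.drop i) := by
  intro L
  induction L with
  | nil =>
    intro _ acc h1 h2 h3
    exact ⟨h1, le_refl _, h3, by simp⟩
  | cons h t ih =>
    intro hsub acc h1 h2 h3
    simp only [List.foldl_cons]
    by_cases hne : h ≠ header
    · simp only [if_pos hne]
      set pos := PySem.Chars.findFrom s h.toList (start : Int) none with hpos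
      by_cases hc : pos ≠ -1 ∧ pos < acc
      · simp only [if_pos hc]
        obtain ⟨hp1, hp2, hp3⟩ := PySem.Chars.findFrom_natCast_spec s h.toList start hstart hc.1
        have hposle : pos ≤ (s.length : Int) := le_of_lt (lt_of_lt_of_le hc.2 h2)
        have hQ : pvHit s header pos.toNat :=
          ⟨h, hsub h List.mem_cons_self, hne, hp2⟩
        obtain ⟨e1, e2, e3, e4⟩ := ih (fun x hx => hsub x (List.mem_cons_of_mem _ hx))
          pos hp1 hposle (Or.inr hQ)
        refine ⟨e1, le_trans e2 (le_of_lt hc.2), e3, ?_⟩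
        intro g hg hgne i hi1 hi2
        rcases List.mem_cons.mp hg with rfl | hgt
        · exact hp3 i hi1 (by omega)
        · exact e4 g hgt hgne i hi1 hi2
      · simp only [if_neg hc]
        obtain ⟨e1, e2, e3, e4⟩ := ih (fun x hx => hsub x (List.mem_cons_of_mem _ hx))
          acc h1 h2 h3
        refine ⟨e1, e2, e3, ?_⟩
        intro g hg hgne i hi1 hi2
        rcases List.mem_cons.mp hg with rfl | hgt
        · -- h was not taken: either pos = -1 (no occurrence ≥ start) or acc ≤ pos
          intro hpre
          rw [not_and_or] at hc
          rcases hc with hpos1 | hle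
          · rw [not_not] at hpos1
            have hno := (PySem.Chars.findFrom_natCast_eq_neg_one_iff s g.toList start hstart).mp hpos1
            exact hno (((pv_drop_drop hi1 ▸ hpre : g.toList <+: (s.drop start).drop (i - start)).isInfix).trans
              (List.drop_suffix _ _).isInfix)
          · rw [not_lt] at hle
            have hpos1 : pos ≠ -1 := by omega
            obtain ⟨hp1, hp2, hp3⟩ := PySem.Chars.findFrom_natCast_spec s g.toList start hstart hpos1
            exact hp3 i hi1 (by omega) hpre
        · exact e4 g hgt hgne i hi1 hi2
    · simp only [if_neg hne]
      obtain ⟨e1, e2, e3, e4⟩ := ih (fun x hx => hsub x (List.mem_cons_of_mem _ hx)) acc h1 h2 h3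
      refine ⟨e1, e2, e3, ?_⟩
      intro g hg hgne i hi1 hi2
      rcases List.mem_cons.mp hg with rfl | hgt
      · exact absurd hgne hne
      · exact e4 g hgt hgne i hi1 hi2

-- B's any-test at position i is exactly pvHit at i.toNat
theorem pvHit_iff (s : List Char) (hd : String) (i : Int) :
    (pvKnownHeaders.any (fun h =>
      decide (h ≠ hd) && PySem.Chars.startswith (s.drop i.toNat) h.toList)) = true ↔
    pvHit s hd i.toNat := by
  simp [pvHit, pvKnownHeaders, pvNextHeaders, PySem.Chars.startswith_iff]

-- ===== VERDICT (by name: the statement is the Claim_ definition above) =====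
theorem extract_section_by_header_spec : Claim_equal_extract_section_by_header := by
  intro text header _
  unfold Spec_extract_section_by_header extract_section_by_header extract_section_by_header_alt
  simp only [PySem.Str.find_eq, PySem.Str.len_eq, PySem.Str.findFrom_eq]
  set s := text.toList with hs
  set f := PySem.Chars.find s header.toList with hf
  by_cases hne : f = -1
  · simp [hne]
  · simp only [if_neg hne]
    have hspec := PySem.Chars.findFrom_natCast_spec s header.toList 0 (Nat.zero_le _)
    simp only [Nat.cast_zero, PySem.Chars.findFrom_zero, ← hf] at hspec
    obtain ⟨hf0, hfpre, -⟩ := hspec hne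
    have hflen : f ≤ (s.length : Int) := PySem.Chars.find_le_length s header.toList
    have hstle : f.toNat + header.toList.length ≤ s.length := by
      have h1 := hfpre.length_le
      simp only [List.length_drop] at h1
      omega
    have hcast : f + (header.toList.length : Int) = ((f.toNat + header.toList.length : Nat) : Int) := by
      push_cast; omega
    rw [hcast]
    set st : Nat := f.toNat + header.toList.length with hstdef
    obtain ⟨e1, e2, e3, e4⟩ := pvFoldA_spec s header st hstle pvNextHeaders (fun _ h => h)
      ((s.length : Int)) (by exact_mod_cast hstle) (le_refl _) (Or.inl rfl)
    set eA := pvNextHeaders.foldl (fun acc h =>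
        if h ≠ header then
          if PySem.Chars.findFrom s h.toList (st : Int) none ≠ -1 ∧
              PySem.Chars.findFrom s h.toList (st : Int) none < acc then
            PySem.Chars.findFrom s h.toList (st : Int) none
          else acc
        else acc) ((s.length : Int)) with heA
    have hB : ((PySem.List.pyRange (st : Int) (s.length : Int)).find? (fun i =>
        pvKnownHeaders.any (fun h =>
          decide (h ≠ header) && PySem.Chars.startswith (s.drop i.toNat) h.toList))).getD
        (s.length : Int) = eA := by
      by_cases hlen : eA = (s.length : Int)
      · have hnone : (PySem.List.pyRange (st : Int) (s.length : Int)).find? (fun i =>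
            pvKnownHeaders.any (fun h =>
              decide (h ≠ header) && PySem.Chars.startswith (s.drop i.toNat) h.toList)) = none := by
          rw [List.find?_eq_none]
          intro x hx hpx
          obtain ⟨hx1, hx2⟩ := PySem.List.mem_pyRange_one.mp hx
          obtain ⟨h, hh, hhd, hpre⟩ := (pvHit_iff s header x).mp hpx
          exact e4 h hh hhd x.toNat (by omega) (by omega : (x.toNat : Int) < eA) hpre
        rw [hnone, Option.getD_none, hlen]
      · have hlt : eA < (s.length : Int) := lt_of_le_of_ne e2 hlen
        have hQ := e3.resolve_left hlen
        have hsome := pv_find?_eq_some (PySem.List.pairwise_lt_pyRange_one (st : Int) (s.length : Int))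
          (fun i => pvKnownHeaders.any (fun h =>
            decide (h ≠ header) && PySem.Chars.startswith (s.drop i.toNat) h.toList))
          eA (PySem.List.mem_pyRange_one.mpr ⟨e1, hlt⟩)
          ((pvHit_iff s header eA).mpr hQ)
          (fun y hy hylt => by
            obtain ⟨hy1, hy2⟩ := PySem.List.mem_pyRange_one.mp hy
            by_contra hpy
            rw [Bool.not_eq_false] at hpy
            obtain ⟨h, hh, hhd, hpre⟩ := (pvHit_iff s header y).mp hpy
            exact e4 h hh hhd y.toNat (by omega) (by omega : (y.toNat : Int) < eA) hpre)
        rw [hsome, Option.getD_some]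
    rw [hB]
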